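-- pv_equiv track=rewrite | github.com/stuntman723/rap-analyzer | lyrics/justAnalyze.py | last_word_repeat
-- ===== SOURCE A (Python) =====
-- def last_word_repeat(words):
-- 	repeats = 0
--
-- 	if len(words) < 2:
-- 		return repeats
--
-- 	i = 1
-- 	while i < len(words):
-- 		if words[i-1] == words[i]:
-- 			repeats += 1
-- 		i += 1
--
-- 	return repeats
-- ===== SOURCE B (Python) =====
-- from itertools import groupby
--
-- def last_word_repeat(words):
--     n = len(words)
--     groups = sum(1 for _ in groupby(words))
--     return n - groups
-- ===== Notes on version B (the rewrite author's own statement) =====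
-- stated objective: idiomatic
-- what changed: Replaces the explicit index loop with pairwise comparisons by itertools.groupby: the number of adjacent-equal pairs equals len(words) minus the number of maximal runs of consecutive equal words.
import Mathlib
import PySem

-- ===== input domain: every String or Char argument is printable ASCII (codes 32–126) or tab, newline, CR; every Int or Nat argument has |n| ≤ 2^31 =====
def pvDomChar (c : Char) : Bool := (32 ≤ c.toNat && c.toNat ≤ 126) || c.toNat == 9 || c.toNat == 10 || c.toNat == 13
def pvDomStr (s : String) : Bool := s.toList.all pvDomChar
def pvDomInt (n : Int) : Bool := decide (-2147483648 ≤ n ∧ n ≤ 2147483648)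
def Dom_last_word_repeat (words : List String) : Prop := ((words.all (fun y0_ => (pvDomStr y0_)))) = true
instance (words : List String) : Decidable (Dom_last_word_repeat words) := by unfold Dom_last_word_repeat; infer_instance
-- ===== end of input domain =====

-- B counts adjacent-equal pairs as length minus number of maximal consecutive runs (itertools.groupby); same cost, more idiomatic.

-- ===== PORT A =====
-- the while loop 'i = 1; while i < len(words): …; i += 1' is a fold over range(1, len(words))
def last_word_repeat (words : List String) : Int :=
  let repeats : Int := 0
  if PySem.List.len words < 2 then repeats
  else
    (PySem.List.pyRange 1 (PySem.List.len words) 1).foldl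
      (fun r i =>
        if PySem.List.pyGetD words (i - 1) "" = PySem.List.pyGetD words i "" then r + 1 else r)
      repeats

-- ===== PORT B =====
-- number of groups produced by itertools.groupby(words): one per maximal run of equal adjacent words
def pvGroupsFrom (x : String) : List String → Int
  | [] => 1
  | y :: ys => if x = y then pvGroupsFrom y ys else 1 + pvGroupsFrom y ys

def last_word_repeat_alt (words : List String) : Int :=
  let n : Int := PySem.List.len words
  let groups : Int :=
    match words with
    | [] => 0
    | x :: xs => pvGroupsFrom x xs
  n - groups

-- ===== PRECONDITION & SPEC =====
def Spec_last_word_repeat (words : List String) (out : Int) : Prop := out = last_word_repeat_alt words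
instance (words : List String) (out : Int) : Decidable (Spec_last_word_repeat words out) := by unfold Spec_last_word_repeat; infer_instance

-- ===== CLAIM (what is proved, stated in full; the proofs are below) =====
def Claim_equal_last_word_repeat : Prop := ∀ (words : List String), Dom_last_word_repeat words → Spec_last_word_repeat words (last_word_repeat words)

-- ===== LEMMAS AND PROOFS =====

-- A's index fold over range(1, n), read through the pair list zip ws ws.tail
lemma pv_range_map_eq_zip (ws : List String) :
    (PySem.List.pyRange 1 (ws.length : Int) 1).map
      (fun i => (PySem.List.pyGetD ws (i - 1) "", PySem.List.pyGetD ws i "")) =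
    ws.zip ws.tail := by
  apply List.ext_getElem
  · simp [PySem.List.length_pyRange_one, List.length_zip]
  · intro k h1 h2
    have hk : k < ws.length - 1 := by
      simpa [PySem.List.length_pyRange_one] using h1
    have hkl : k < ws.length := by omega
    have hk1 : k + 1 < ws.length := by omega
    simp only [List.getElem_map, PySem.List.getElem_pyRange_one, List.getElem_zip]
    have e1 : (1 : Int) + (k : Int) - 1 = ((k : Nat) : Int) := by omega
    have e2 : (1 : Int) + (k : Int) = (((k + 1 : Nat)) : Int) := by push_cast; ring
    rw [e1, e2, PySem.List.pyGetD_natCast, PySem.List.pyGetD_natCast]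
    simp [List.getD_eq_getElem?_getD, hkl, hk1, List.getElem_tail]

-- counting equal pairs along zip equals length minus number of runs
lemma pv_zip_fold (xs : List String) : ∀ (x : String) (r : Int),
    ((x :: xs).zip xs).foldl (fun r p => if p.1 = p.2 then r + 1 else r) r =
      r + (xs.length : Int) + 1 - pvGroupsFrom x xs := by
  induction xs with
  | nil => intro x r; simp [pvGroupsFrom]
  | cons y ys ih =>
    intro x r
    simp only [List.zip_cons_cons, List.foldl_cons, pvGroupsFrom]
    by_cases h : x = y
    · rw [if_pos h, if_pos h, ih y (r + 1)]
      simp only [List.length_cons]; push_cast; omega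
    · rw [if_neg h, if_neg h, ih y r]
      simp only [List.length_cons]; push_cast; omega

-- ===== VERDICT (by name: the statement is the Claim_ definition above) =====
theorem last_word_repeat_spec : Claim_equal_last_word_repeat := by
  intro words _
  unfold Spec_last_word_repeat last_word_repeat last_word_repeat_alt
  cases words with
  | nil => simp
  | cons x xs =>
    cases xs with
    | nil => simp [pvGroupsFrom]
    | cons y ys =>
      have hlen : ¬ PySem.List.len (x :: y :: ys) < 2 := by
        simp [PySem.List.len_eq]
      simp only [hlen, if_false]
      have hfold := pv_range_map_eq_zip (x :: y :: ys)
      calc (PySem.List.pyRange 1 (PySem.List.len (x :: y :: ys)) 1).foldl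
              (fun r i => if PySem.List.pyGetD (x :: y :: ys) (i - 1) "" =
                  PySem.List.pyGetD (x :: y :: ys) i "" then r + 1 else r) 0
          = (((PySem.List.pyRange 1 ((x :: y :: ys).length : Int) 1).map
              (fun i => (PySem.List.pyGetD (x :: y :: ys) (i - 1) "",
                         PySem.List.pyGetD (x :: y :: ys) i ""))).foldl
              (fun r p => if p.1 = p.2 then r + 1 else r) (0 : Int)) := by
            rw [List.foldl_map]; simp [PySem.List.len_eq]
        _ = (((x :: y :: ys).zip (y :: ys)).foldl
              (fun r p => if p.1 = p.2 then r + 1 else r) (0 : Int)) := by rw [hfold]; rfl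
        _ = (0 : Int) + ((y :: ys).length : Int) + 1 - pvGroupsFrom x (y :: ys) := pv_zip_fold _ _ _
        _ = PySem.List.len (x :: y :: ys) - pvGroupsFrom x (y :: ys) := by
            simp only [PySem.List.len_eq, List.length_cons]; push_cast; omega
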